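-- pv_equiv track=rewrite | github.com/csnoboa/script_tests | test.py | functionTest
-- ===== SOURCE A (Python) =====
-- def functionTest(maxDigit):
--     array = []
--     for i in range(maxDigit+1):
--         for y in range(maxDigit+1):
--             for j in range(maxDigit+1):
--                 for x in range(maxDigit+1):
--                     if (x + j + y + i) == 21:
--                         candidato = i*1000 + y*100 + j*10 + x
--                         if(candidato > 1000):
--
--                             array.append( candidato )
--
--
--     return array
-- ===== SOURCE B (Python) =====
-- def functionTest(maxDigit):
--     # digits are non-negative, so any quadruple summing to 21 has each digit <= 21:
--     # looping past 21 can never contribute, whatever maxDigit is.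
--     r = range(min(maxDigit, 21) + 1)
--     return [i * 1000 + y * 100 + j * 10 + (21 - i - y - j)
--             for i in r for y in r for j in r
--             if 0 <= 21 - i - y - j <= maxDigit
--             and i * 1000 + y * 100 + j * 10 + (21 - i - y - j) > 1000]
-- ===== Notes on version B (the rewrite author's own statement) =====
-- stated objective: faster
-- what changed: A's accumulator loops and the innermost x-loop are replaced by one comprehension over (i,y,j) whose ranges are capped at min(maxDigit,21) (non-negative digits summing to 21 are each at most 21) and which solves x = 21-i-y-j directly, so B runs in constant time in maxDigit.
import Mathlib
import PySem

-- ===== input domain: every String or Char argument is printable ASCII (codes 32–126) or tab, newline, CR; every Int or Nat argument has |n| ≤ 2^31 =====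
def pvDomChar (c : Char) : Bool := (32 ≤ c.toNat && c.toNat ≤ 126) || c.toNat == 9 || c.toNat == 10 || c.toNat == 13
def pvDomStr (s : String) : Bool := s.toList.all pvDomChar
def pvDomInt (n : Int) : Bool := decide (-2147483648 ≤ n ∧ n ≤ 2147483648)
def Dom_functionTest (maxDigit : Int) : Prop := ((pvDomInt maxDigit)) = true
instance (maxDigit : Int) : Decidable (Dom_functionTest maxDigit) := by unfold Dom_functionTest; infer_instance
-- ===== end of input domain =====

-- B replaces A's four accumulator loops by one comprehension over (i,y,j) capped at 21 (digits summing to 21 are each at most 21) that solves x = 21-i-y-j directly (objective: faster).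

-- ===== PORT A =====
def functionTest (maxDigit : Int) : List Int :=
  (PySem.List.pyRange 0 (maxDigit + 1) 1).foldl (fun array i =>
    (PySem.List.pyRange 0 (maxDigit + 1) 1).foldl (fun array y =>
      (PySem.List.pyRange 0 (maxDigit + 1) 1).foldl (fun array j =>
        (PySem.List.pyRange 0 (maxDigit + 1) 1).foldl (fun array x =>
          if x + j + y + i = 21 then
            let candidato := i * 1000 + y * 100 + j * 10 + x
            if candidato > 1000 then array ++ [candidato] else array
          else array) array) array) array) []

-- ===== PORT B =====
def functionTest_alt (maxDigit : Int) : List Int :=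
  let r := PySem.List.pyRange 0 (min maxDigit 21 + 1) 1
  r.flatMap (fun i =>
    r.flatMap (fun y =>
      r.filterMap (fun j =>
        if 0 ≤ 21 - i - y - j ∧ 21 - i - y - j ≤ maxDigit ∧
           i * 1000 + y * 100 + j * 10 + (21 - i - y - j) > 1000
        then some (i * 1000 + y * 100 + j * 10 + (21 - i - y - j))
        else none)))

-- ===== PRECONDITION & SPEC =====
def Spec_functionTest (maxDigit : Int) (out : List Int) : Prop := out = functionTest_alt maxDigit
instance (maxDigit : Int) (out : List Int) : Decidable (Spec_functionTest maxDigit out) := by unfold Spec_functionTest; infer_instance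

-- ===== CLAIM (what is proved, stated in full; the proofs are below) =====
def Claim_equal_functionTest : Prop := ∀ (maxDigit : Int), Dom_functionTest maxDigit → Spec_functionTest maxDigit (functionTest maxDigit)

-- ===== LEMMAS AND PROOFS =====

-- The Option produced by B's comprehension body at (i, y, j).
def pvBody (m i y j : Int) : Option Int :=
  if 0 ≤ 21 - i - y - j ∧ 21 - i - y - j ≤ m ∧
     i * 1000 + y * 100 + j * 10 + (21 - i - y - j) > 1000
  then some (i * 1000 + y * 100 + j * 10 + (21 - i - y - j))
  else none

-- On a duplicate-free list, filtering by a predicate that only ever accepts t keeps at most that one element.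
theorem pv_filter_unique {l : List Int} (hl : l.Nodup) (p : Int → Bool) (t : Int)
    (hp : ∀ x, p x = true → x = t) :
    l.filter p = if t ∈ l ∧ p t = true then [t] else [] := by
  induction l with
  | nil => simp
  | cons a l ih =>
    have hnd := hl
    rw [List.nodup_cons] at hnd
    by_cases h : p a = true
    · have hat : a = t := hp a h
      subst hat
      have : l.filter p = [] := by
        rw [ih hnd.2]
        simp [hnd.1]
      simp [h, this]
    · rw [List.filter_cons]
      simp only [h]
      rw [ih hnd.2]
      by_cases hta : t = a
      · subst hta; simp [h]
      · simp [List.mem_cons, hta]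

-- A's innermost x-loop contributes exactly the (at most one) element of pvBody m i y j.
theorem pv_inner_eq (m i y j : Int) (acc : List Int) :
    (PySem.List.pyRange 0 (m + 1) 1).foldl (fun array x =>
        if x + j + y + i = 21 then
          let candidato := i * 1000 + y * 100 + j * 10 + x
          if candidato > 1000 then array ++ [candidato] else array
        else array) acc
    = acc ++ (pvBody m i y j).toList := by
  set t : Int := 21 - i - y - j with ht
  set c : Int → Int := fun x => i * 1000 + y * 100 + j * 10 + x with hc
  set p : Int → Bool := fun x => decide (x + j + y + i = 21) && decide (c x > 1000) with hpdef
  have hcongr : (PySem.List.pyRange 0 (m + 1) 1).foldl (fun array x =>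
        if x + j + y + i = 21 then
          let candidato := i * 1000 + y * 100 + j * 10 + x
          if candidato > 1000 then array ++ [candidato] else array
        else array) acc
      = (PySem.List.pyRange 0 (m + 1) 1).foldl (fun array x =>
          if p x then array ++ [c x] else array) acc := by
    apply PySem.List.foldl_congr_mem
    intro a x _
    by_cases h1 : x + j + y + i = 21 <;> by_cases h2 : c x > 1000 <;>
      simp [hpdef, hc, h1]
  rw [hcongr, PySem.List.foldl_append_if]
  have hp : ∀ x, p x = true → x = t := by
    intro x hx
    simp [hpdef] at hx
    omega
  rw [pv_filter_unique (PySem.List.nodup_pyRange_one 0 (m + 1)) p t hp]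
  by_cases hmem : t ∈ PySem.List.pyRange 0 (m + 1) 1
  · have hb : 0 ≤ t ∧ t < m + 1 := (PySem.List.mem_pyRange_one).1 hmem
    by_cases h2 : c t > 1000
    · have hpt : p t = true := by simp [hpdef, hc] at *; omega
      have hbody : pvBody m i y j = some (c t) := by
        simp only [pvBody]
        rw [if_pos ⟨hb.1, by omega, h2⟩]
      simp [hmem, hpt, hbody]
    · have hpt : ¬ p t = true := by simp [hpdef]; intro _; omega
      have hbody : pvBody m i y j = none := by
        simp only [pvBody]
        rw [if_neg]
        intro h; exact h2 h.2.2
      simp [hmem, hpt, hbody]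
  · have hb : ¬ (0 ≤ t ∧ t ≤ m) := by
      intro h
      exact hmem ((PySem.List.mem_pyRange_one).2 ⟨h.1, by omega⟩)
    have hbody : pvBody m i y j = none := by
      simp only [pvBody]
      rw [if_neg]
      intro h; exact hb ⟨h.1, h.2.1⟩
    simp [hmem, hbody]

-- A's j-loop contributes exactly B's filterMap over j.
theorem pv_j_eq (m i y : Int) (acc : List Int) :
    (PySem.List.pyRange 0 (m + 1) 1).foldl (fun array j =>
        (PySem.List.pyRange 0 (m + 1) 1).foldl (fun array x =>
          if x + j + y + i = 21 then
            let candidato := i * 1000 + y * 100 + j * 10 + x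
            if candidato > 1000 then array ++ [candidato] else array
          else array) array) acc
    = acc ++ (PySem.List.pyRange 0 (m + 1) 1).filterMap (pvBody m i y) := by
  have h1 : ∀ (a : List Int) (j : Int), j ∈ PySem.List.pyRange 0 (m + 1) 1 →
      (PySem.List.pyRange 0 (m + 1) 1).foldl (fun array x =>
          if x + j + y + i = 21 then
            let candidato := i * 1000 + y * 100 + j * 10 + x
            if candidato > 1000 then array ++ [candidato] else array
          else array) a = a ++ (pvBody m i y j).toList := fun a j _ => pv_inner_eq m i y j a
  rw [PySem.List.foldl_congr_mem _ _ _ _ h1, PySem.List.foldl_append_eq_flatMap]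
  congr 1
  rw [List.filterMap_eq_flatMap_toList]

-- Elements past 21 contribute nothing: the j-range may be capped at min(b,21).
theorem pv_cap_filterMap (b : Int) (g : Int → Option Int)
    (hg : ∀ j, 22 ≤ j → g j = none) :
    (PySem.List.pyRange 0 (b + 1) 1).filterMap g
      = (PySem.List.pyRange 0 (min b 21 + 1) 1).filterMap g := by
  by_cases h : b ≤ 21
  · rw [min_eq_left h]
  · rw [min_eq_right (by omega : (21:Int) ≤ b),
        PySem.List.pyRange_one_append 0 22 (b + 1) (by norm_num) (by omega),
        List.filterMap_append]
    have h0 : (PySem.List.pyRange 22 (b + 1) 1).filterMap g = [] :=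
      List.filterMap_eq_nil_iff.mpr fun x hx =>
        hg x ((PySem.List.mem_pyRange_one).1 hx).1
    simp [h0]

-- Same capping for an outer (i or y) loop.
theorem pv_cap_flatMap (b : Int) (f : Int → List Int)
    (hf : ∀ i, 22 ≤ i → f i = []) :
    (PySem.List.pyRange 0 (b + 1) 1).flatMap f
      = (PySem.List.pyRange 0 (min b 21 + 1) 1).flatMap f := by
  by_cases h : b ≤ 21
  · rw [min_eq_left h]
  · rw [min_eq_right (by omega : (21:Int) ≤ b),
        PySem.List.pyRange_one_append 0 22 (b + 1) (by norm_num) (by omega),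
        List.flatMap_append]
    have h0 : (PySem.List.pyRange 22 (b + 1) 1).flatMap f = [] :=
      List.flatMap_eq_nil_iff.mpr fun x hx =>
        hf x ((PySem.List.mem_pyRange_one).1 hx).1
    simp [h0]

-- pvBody is none as soon as one of the three indices exceeds 21 (the others being non-negative).
theorem pv_body_none (m i y j : Int) (h : 22 ≤ i + y + j) : pvBody m i y j = none := by
  simp only [pvBody]
  rw [if_neg]
  intro hc
  omega

-- ===== VERDICT (by name: the statement is the Claim_ definition above) =====
theorem functionTest_spec : Claim_equal_functionTest := by
  intro m _
  unfold Spec_functionTest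
  have hA : functionTest m
      = (PySem.List.pyRange 0 (m + 1) 1).flatMap (fun i =>
          (PySem.List.pyRange 0 (m + 1) 1).flatMap (fun y =>
            (PySem.List.pyRange 0 (m + 1) 1).filterMap (pvBody m i y))) := by
    unfold functionTest
    have hy : ∀ (a : List Int) (i : Int), i ∈ PySem.List.pyRange 0 (m + 1) 1 →
        (PySem.List.pyRange 0 (m + 1) 1).foldl (fun array y =>
          (PySem.List.pyRange 0 (m + 1) 1).foldl (fun array j =>
            (PySem.List.pyRange 0 (m + 1) 1).foldl (fun array x =>
              if x + j + y + i = 21 then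
                let candidato := i * 1000 + y * 100 + j * 10 + x
                if candidato > 1000 then array ++ [candidato] else array
              else array) array) array) a
        = a ++ (PySem.List.pyRange 0 (m + 1) 1).flatMap (fun y =>
            (PySem.List.pyRange 0 (m + 1) 1).filterMap (pvBody m i y)) := by
      intro a i _
      have hj : ∀ (b : List Int) (y : Int), y ∈ PySem.List.pyRange 0 (m + 1) 1 →
          (PySem.List.pyRange 0 (m + 1) 1).foldl (fun array j =>
            (PySem.List.pyRange 0 (m + 1) 1).foldl (fun array x =>
              if x + j + y + i = 21 then
                let candidato := i * 1000 + y * 100 + j * 10 + x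
                if candidato > 1000 then array ++ [candidato] else array
              else array) array) b
          = b ++ (PySem.List.pyRange 0 (m + 1) 1).filterMap (pvBody m i y) :=
        fun b y _ => pv_j_eq m i y b
      exact (PySem.List.foldl_congr_mem _ _ _ _ hj).trans (PySem.List.foldl_append_eq_flatMap _ _ _)
    refine (PySem.List.foldl_congr_mem _ _ _ _ hy).trans ?_
    rw [PySem.List.foldl_append_eq_flatMap, List.nil_append]
  rw [hA]
  have step1 : (PySem.List.pyRange 0 (m + 1) 1).flatMap (fun i =>
        (PySem.List.pyRange 0 (m + 1) 1).flatMap (fun y =>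
          (PySem.List.pyRange 0 (m + 1) 1).filterMap (pvBody m i y)))
      = (PySem.List.pyRange 0 (min m 21 + 1) 1).flatMap (fun i =>
          (PySem.List.pyRange 0 (min m 21 + 1) 1).flatMap (fun y =>
            (PySem.List.pyRange 0 (min m 21 + 1) 1).filterMap (pvBody m i y))) := by
    have hcapj : ∀ i y : Int, 0 ≤ i → 0 ≤ y →
        (PySem.List.pyRange 0 (m + 1) 1).filterMap (pvBody m i y)
          = (PySem.List.pyRange 0 (min m 21 + 1) 1).filterMap (pvBody m i y) :=
      fun i y hi hy => pv_cap_filterMap m _ (fun j hj => pv_body_none m i y j (by omega))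
    have hcapEmpty : ∀ i y : Int, 0 ≤ i → 22 ≤ y →
        (PySem.List.pyRange 0 (min m 21 + 1) 1).filterMap (pvBody m i y) = [] :=
      fun i y hi hy => List.filterMap_eq_nil_iff.mpr fun j hj =>
        pv_body_none m i y j (by
          have := ((PySem.List.mem_pyRange_one).1 hj).1; omega)
    calc (PySem.List.pyRange 0 (m + 1) 1).flatMap (fun i =>
            (PySem.List.pyRange 0 (m + 1) 1).flatMap (fun y =>
              (PySem.List.pyRange 0 (m + 1) 1).filterMap (pvBody m i y)))
        = (PySem.List.pyRange 0 (m + 1) 1).flatMap (fun i =>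
            (PySem.List.pyRange 0 (m + 1) 1).flatMap (fun y =>
              (PySem.List.pyRange 0 (min m 21 + 1) 1).filterMap (pvBody m i y))) := by
          refine List.flatMap_congr fun i hi => List.flatMap_congr fun y hy => ?_
          exact hcapj i y ((PySem.List.mem_pyRange_one).1 hi).1 ((PySem.List.mem_pyRange_one).1 hy).1
      _ = (PySem.List.pyRange 0 (m + 1) 1).flatMap (fun i =>
            (PySem.List.pyRange 0 (min m 21 + 1) 1).flatMap (fun y =>
              (PySem.List.pyRange 0 (min m 21 + 1) 1).filterMap (pvBody m i y))) := by
          refine List.flatMap_congr fun i hi => ?_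
          exact pv_cap_flatMap m _ (fun y hy =>
            hcapEmpty i y ((PySem.List.mem_pyRange_one).1 hi).1 hy)
      _ = (PySem.List.pyRange 0 (min m 21 + 1) 1).flatMap (fun i =>
            (PySem.List.pyRange 0 (min m 21 + 1) 1).flatMap (fun y =>
              (PySem.List.pyRange 0 (min m 21 + 1) 1).filterMap (pvBody m i y))) := by
          refine pv_cap_flatMap m _ (fun i hi => ?_)
          exact List.flatMap_eq_nil_iff.mpr fun y hy =>
            List.filterMap_eq_nil_iff.mpr fun j hj =>
              pv_body_none m i y j (by
                have := ((PySem.List.mem_pyRange_one).1 hy).1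
                have := ((PySem.List.mem_pyRange_one).1 hj).1
                omega)
  rw [step1]
  simp [functionTest_alt, pvBody]
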